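-- pv_equiv track=rewrite | github.com/Eloekamaje/TransNet | extract_key_frames.py | infos_calculation
-- ===== SOURCE A (Python) =====
-- def infos_calculation(total, transitions, every):
--     mapping = dict()
--     scenes = dict()
--     isTransitions = dict()
--     isTransition = False
--     scene_index = -1
--     frame_index = 0
--     for i in range(total):
--         if i % every == 0 or i in transitions:
--             mapping[i] = frame_index
--             if i in transitions:
--                 isTransition = True
--                 scene_index += 1
--             else:
--                 isTransition = False
--             scenes[i] = scene_index
--             isTransitions[i] = isTransition
--             frame_index += 1
--     return mapping, scenes, isTransitions
-- ===== SOURCE B (Python) =====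
-- def infos_calculation(total, transitions, every):
--     if total <= 0:
--         return {}, {}, {}
--     tset = {t for t in transitions if 0 <= t < total}
--     kept = sorted(tset.union(range(0, total, abs(every))))
--     mapping = dict(zip(kept, range(len(kept))))
--     isTransitions = {i: i in tset for i in kept}
--     scenes = {}
--     scene = -1
--     for i in kept:
--         scene += i in tset
--         scenes[i] = scene
--     return mapping, scenes, isTransitions
-- ===== Notes on version B (the rewrite author's own statement) =====
-- stated objective: alternative
-- what changed: Instead of scanning every frame index and testing modulo and list membership, B generates the kept frames directly as the sorted union of an arithmetic range of multiples of |every| with the set of in-range transitions, then reads the three dicts off that list; it trades the per-index scan for set construction and a sort.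
import Mathlib
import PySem

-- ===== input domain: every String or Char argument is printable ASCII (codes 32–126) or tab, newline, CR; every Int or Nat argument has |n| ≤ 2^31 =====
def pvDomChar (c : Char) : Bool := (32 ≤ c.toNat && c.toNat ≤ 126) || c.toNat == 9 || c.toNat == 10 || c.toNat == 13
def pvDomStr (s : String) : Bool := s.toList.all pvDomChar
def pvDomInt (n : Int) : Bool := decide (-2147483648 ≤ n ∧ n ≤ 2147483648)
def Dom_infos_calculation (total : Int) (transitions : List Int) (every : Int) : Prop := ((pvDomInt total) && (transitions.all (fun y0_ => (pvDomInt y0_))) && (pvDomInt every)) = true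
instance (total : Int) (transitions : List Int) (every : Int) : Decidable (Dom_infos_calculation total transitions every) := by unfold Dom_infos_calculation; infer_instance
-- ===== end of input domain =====

-- B replaces A's scan of every frame index (modulo test + list membership per index) by generating
-- the kept frames directly: the multiples of |every| come from an arithmetic range, the in-range
-- transitions from a set, and their sorted union is the kept list the three dicts are read off.

-- ===== PORT A =====
-- A-side helper: the body of A's for-loop (one step of the interleaved state machine).
def pvStepA (transitions : List Int) (every : Int)
    (st : PySem.Dict Int Int × PySem.Dict Int Int × PySem.Dict Int Bool × Bool × Int × Int)
    (i : Int) : PySem.Dict Int Int × PySem.Dict Int Int × PySem.Dict Int Bool × Bool × Int × Int :=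
  if PySem.Int.mod i every == 0 || transitions.contains i then
    if transitions.contains i then
      (st.1.insert i st.2.2.2.2.2, st.2.1.insert i (st.2.2.2.2.1 + 1), st.2.2.1.insert i true,
       true, st.2.2.2.2.1 + 1, st.2.2.2.2.2 + 1)
    else
      (st.1.insert i st.2.2.2.2.2, st.2.1.insert i st.2.2.2.2.1, st.2.2.1.insert i false,
       false, st.2.2.2.2.1, st.2.2.2.2.2 + 1)
  else st

def infos_calculation (total : Int) (transitions : List Int) (every : Int) :
    (List (Int × Int)) × (List (Int × Int)) × (List (Int × Bool)) :=
  let res := (PySem.List.pyRange 0 total 1).foldl (pvStepA transitions every)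
      (PySem.Dict.empty, PySem.Dict.empty, PySem.Dict.empty, false, -1, 0)
  (res.1.items, res.2.1.items, res.2.2.1.items)

-- ===== PORT B =====
-- kept is a sorted duplicate-free set, so dict(zip(kept, range(len(kept)))) and the two
-- comprehensions over kept are the association lists written directly below.
def infos_calculation_alt (total : Int) (transitions : List Int) (every : Int) :
    (List (Int × Int)) × (List (Int × Int)) × (List (Int × Bool)) :=
  if total ≤ 0 then ([], [], [])
  else
    let tset := PySem.Set.ofList (transitions.filter (fun t => decide (0 ≤ t) && decide (t < total)))
    let kept := PySem.List.sorted
      (PySem.Set.union tset (PySem.List.pyRange 0 total ((every.natAbs : Int)))) (fun x => x)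
    let mapping := kept.zip (PySem.List.pyRange 0 (kept.length : Int) 1)
    let isTransitions := kept.map (fun i => (i, tset.contains i))
    let scenes := (kept.foldl
        (fun (acc : List (Int × Int) × Int) i =>
          let sc := acc.2 + (if tset.contains i then 1 else 0)
          (acc.1 ++ [(i, sc)], sc)) ([], -1)).1
    (mapping, scenes, isTransitions)

-- ===== PRECONDITION & SPEC =====
-- Pre_ excludes exactly the inputs where Python A raises ZeroDivisionError (i % every at i = 0):
-- every == 0 with a nonempty range; B raises there too (range step / abs with 0).
def Pre_infos_calculation (total : Int) (transitions : List Int) (every : Int) : Prop :=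
  total ≤ 0 ∨ every ≠ 0
instance (total : Int) (transitions : List Int) (every : Int) : Decidable (Pre_infos_calculation total transitions every) := by unfold Pre_infos_calculation; infer_instance
def pvWitness_infos_calculation : Int × List Int × Int := (6, [2, 3], 2)

def Spec_infos_calculation (total : Int) (transitions : List Int) (every : Int) (out : (List (Int × Int)) × (List (Int × Int)) × (List (Int × Bool))) : Prop := out = infos_calculation_alt total transitions every
instance (total : Int) (transitions : List Int) (every : Int) (out : (List (Int × Int)) × (List (Int × Int)) × (List (Int × Bool))) : Decidable (Spec_infos_calculation total transitions every out) := by unfold Spec_infos_calculation; infer_instance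

-- ===== CLAIM (what is proved, stated in full; the proofs are below) =====
def Claim_equal_infos_calculation : Prop := ∀ (total : Int) (transitions : List Int) (every : Int), Dom_infos_calculation total transitions every → Pre_infos_calculation total transitions every → Spec_infos_calculation total transitions every (infos_calculation total transitions every)

-- ===== LEMMAS AND PROOFS =====

-- scenes of the kept list under a membership test q, with a running counter.
def pvScB (q : Int → Bool) : List Int → Int → List (Int × Int)
  | [], _ => []
  | i :: l, sc =>
      let sc' := if q i then sc + 1 else sc
      (i, sc') :: pvScB q l sc'

def pvScLast (q : Int → Bool) : List Int → Int → Int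
  | [], sc => sc
  | i :: l, sc => pvScLast q l (if q i then sc + 1 else sc)

-- B's scenes fold, characterised; q2 may be any test agreeing with q1 on the list.
lemma pvScFoldB (q1 q2 : Int → Bool) :
    ∀ (l : List Int), (∀ i ∈ l, q2 i = q1 i) → ∀ (acc : List (Int × Int)) (sc : Int),
    l.foldl (fun (a : List (Int × Int) × Int) i =>
        let s := a.2 + (if q2 i then 1 else 0)
        (a.1 ++ [(i, s)], s)) (acc, sc)
      = (acc ++ pvScB q1 l sc, pvScLast q1 l sc) := by
  intro l
  induction l with
  | nil => intro _ acc sc; simp [pvScB, pvScLast]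
  | cons i l ih =>
      intro hq acc sc
      have hqi : q2 i = q1 i := hq i (by simp)
      simp only [List.foldl_cons, pvScB, pvScLast, hqi]
      rw [ih (fun j hj => hq j (by simp [hj]))]
      by_cases h : q1 i = true <;> simp [h]

-- A's fold, characterised: its three dicts are the filter-based lists.
lemma pvFoldA (transitions : List Int) (every : Int) :
    ∀ (l : List Int), l.Nodup →
    ∀ (m s : PySem.Dict Int Int) (t : PySem.Dict Int Bool) (b : Bool) (sc fi : Int),
    (∀ x ∈ l, m.contains x = false) → (∀ x ∈ l, s.contains x = false) →
    (∀ x ∈ l, t.contains x = false) →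
    (l.foldl (pvStepA transitions every) (m, s, t, b, sc, fi)).1.items
        = m.items ++ (PySem.List.enumerate
            (l.filter (fun i => PySem.Int.mod i every == 0 || transitions.contains i)) fi).map
            (fun p => (p.2, p.1))
    ∧ (l.foldl (pvStepA transitions every) (m, s, t, b, sc, fi)).2.1.items
        = s.items ++ pvScB (fun i => transitions.contains i)
            (l.filter (fun i => PySem.Int.mod i every == 0 || transitions.contains i)) sc
    ∧ (l.foldl (pvStepA transitions every) (m, s, t, b, sc, fi)).2.2.1.items
        = t.items ++ (l.filter (fun i => PySem.Int.mod i every == 0 || transitions.contains i)).map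
            (fun i => (i, transitions.contains i)) := by
  intro l
  induction l with
  | nil => intro _ m s t b sc fi _ _ _; simp [PySem.List.enumerate_nil, pvScB]
  | cons i l ih =>
      intro hnd m s t b sc fi hm hs ht
      have hnd' : l.Nodup := (List.nodup_cons.mp hnd).2
      have hi : i ∉ l := (List.nodup_cons.mp hnd).1
      have hmi : m.contains i = false := hm i (by simp)
      have hsi : s.contains i = false := hs i (by simp)
      have hti : t.contains i = false := ht i (by simp)
      have hfresh : ∀ (ν : Type) (d : PySem.Dict Int ν) (v : ν), d.contains i = false →
          (∀ x ∈ i :: l, d.contains x = false) → ∀ x ∈ l, (d.insert i v).contains x = false := by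
        intro ν d v hdi hd x hx
        rw [PySem.Dict.contains_insert]
        have hne : (x == i) = false := by
          simp only [beq_eq_false_iff_ne]; intro h; exact hi (h ▸ hx)
        simp [hne, hd x (by simp [hx])]
      simp only [List.foldl_cons, List.filter_cons]
      by_cases hc : PySem.Int.mod i every = 0 ∨ i ∈ transitions
      · -- i is kept
        by_cases htr : i ∈ transitions
        · have hstep : pvStepA transitions every (m, s, t, b, sc, fi) i
              = (m.insert i fi, s.insert i (sc + 1), t.insert i true, true, sc + 1, fi + 1) := by
            simp [pvStepA, htr]
          rw [hstep]
          obtain ⟨e1, e2, e3⟩ := ih hnd'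
            (m.insert i fi) (s.insert i (sc + 1)) (t.insert i true) true (sc + 1) (fi + 1)
            (hfresh _ m fi hmi hm) (hfresh _ s (sc + 1) hsi hs) (hfresh _ t true hti ht)
          rw [e1, e2, e3, PySem.Dict.items_insert_of_not_contains m fi hmi,
            PySem.Dict.items_insert_of_not_contains s (sc + 1) hsi,
            PySem.Dict.items_insert_of_not_contains t true hti]
          refine ⟨?_, ?_, ?_⟩ <;>
            simp [htr, pvScB, PySem.List.enumerate_cons]
        · have hmod : PySem.Int.mod i every = 0 := hc.resolve_right htr
          have hstep : pvStepA transitions every (m, s, t, b, sc, fi) i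
              = (m.insert i fi, s.insert i sc, t.insert i false, false, sc, fi + 1) := by
            simp [pvStepA, hmod, htr]
          rw [hstep]
          obtain ⟨e1, e2, e3⟩ := ih hnd'
            (m.insert i fi) (s.insert i sc) (t.insert i false) false sc (fi + 1)
            (hfresh _ m fi hmi hm) (hfresh _ s sc hsi hs) (hfresh _ t false hti ht)
          rw [e1, e2, e3, PySem.Dict.items_insert_of_not_contains m fi hmi,
            PySem.Dict.items_insert_of_not_contains s sc hsi,
            PySem.Dict.items_insert_of_not_contains t false hti]
          refine ⟨?_, ?_, ?_⟩ <;>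
            simp [hmod, htr, pvScB, PySem.List.enumerate_cons]
      · -- i is skipped
        have hstep : pvStepA transitions every (m, s, t, b, sc, fi) i
            = (m, s, t, b, sc, fi) := by
          simp [pvStepA, hc]
        rw [hstep]
        have h3 := ih hnd' m s t b sc fi (fun x hx => hm x (by simp [hx]))
          (fun x hx => hs x (by simp [hx])) (fun x hx => ht x (by simp [hx]))
        simpa [hc] using h3

-- B's kept list IS the filtered range A walks, for every ≠ 0.
lemma pvKept (total : Int) (transitions : List Int) (every : Int) (he : every ≠ 0) :
    PySem.List.sorted
      (PySem.Set.union
        (PySem.Set.ofList (transitions.filter (fun t => decide (0 ≤ t) && decide (t < total))))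
        (PySem.List.pyRange 0 total ((every.natAbs : Int)))) (fun x => x)
    = (PySem.List.pyRange 0 total 1).filter
        (fun i => PySem.Int.mod i every == 0 || transitions.contains i) := by
  have hpos : (0 : Int) < (every.natAbs : Int) := by
    have := Int.natAbs_pos.mpr he; exact_mod_cast this
  apply PySem.List.sorted_eq_of_perm_of_pairwise_lt
  · rw [List.perm_ext_iff_of_nodup
      ((PySem.List.nodup_pyRange_one 0 total).filter _)
      (PySem.Set.nodup_union _ _ (PySem.Set.nodup_ofList _))]
    intro x
    rw [List.mem_filter, PySem.Set.mem_union, PySem.Set.mem_ofList, List.mem_filter,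
      PySem.List.mem_pyRange_one, PySem.List.mem_pyRange_iff_of_pos hpos]
    have hdvd : (PySem.Int.mod x every == 0) = true ↔ ((every.natAbs : Int) ∣ x) := by
      rw [beq_iff_eq, PySem.Int.mod_eq_zero_iff_dvd]
      exact (Int.natAbs_dvd).symm
    simp only [Bool.or_eq_true, hdvd, List.contains_eq_mem, decide_eq_true_eq,
      Bool.and_eq_true, sub_zero]
    tauto
  · exact (PySem.List.pairwise_lt_pyRange_one 0 total).filter _

-- dict(zip(xs, range(s, s+len))) written via enumerate.
lemma pvZipRange : ∀ (xs : List Int) (s : Int),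
    xs.zip (PySem.List.pyRange s (s + (xs.length : Int)) 1)
      = (PySem.List.enumerate xs s).map (fun p => (p.2, p.1)) := by
  intro xs
  induction xs with
  | nil => intro s; simp [PySem.List.enumerate_nil]
  | cons x l ih =>
      intro s
      have hlt : s < s + ((x :: l).length : Int) := by simp
      rw [PySem.List.pyRange_one_cons hlt, PySem.List.enumerate_cons]
      have : s + ((x :: l).length : Int) = (s + 1) + (l.length : Int) := by
        simp; omega
      rw [this]
      simp [List.zip_cons_cons, ih (s + 1)]

-- tset membership agrees with list membership on in-range indices.
lemma pvTset (total : Int) (transitions : List Int) (i : Int) (h0 : 0 ≤ i) (h1 : i < total) :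
    (PySem.Set.ofList (transitions.filter (fun t => decide (0 ≤ t) && decide (t < total)))).contains i
      = transitions.contains i := by
  simp only [PySem.Set.contains_eq_listContains, List.contains_eq_mem]
  by_cases hm : i ∈ transitions
  · simp [PySem.Set.mem_ofList, List.mem_filter, hm, h0, h1]
  · simp [PySem.Set.mem_ofList, List.mem_filter, hm]

-- ===== VERDICT (by name: the statement is the Claim_ definition above) =====
theorem infos_calculation_spec : Claim_equal_infos_calculation := by
  intro total transitions every _ hpre
  unfold Spec_infos_calculation infos_calculation infos_calculation_alt
  by_cases htot : total ≤ 0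
  · rw [PySem.List.pyRange_one_eq_nil htot]
    simp [htot, PySem.Dict.empty]
  · have he : every ≠ 0 := hpre.resolve_left htot
    simp only [if_neg htot]
    obtain ⟨e1, e2, e3⟩ := pvFoldA transitions every (PySem.List.pyRange 0 total 1)
      (PySem.List.nodup_pyRange_one 0 total)
      PySem.Dict.empty PySem.Dict.empty PySem.Dict.empty false (-1) 0
      (by intro x _; simp [PySem.Dict.contains_empty])
      (by intro x _; simp [PySem.Dict.contains_empty])
      (by intro x _; simp [PySem.Dict.contains_empty])
    rw [e1, e2, e3]
    rw [pvKept total transitions every he]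
    set kept := (PySem.List.pyRange 0 total 1).filter
      (fun i => PySem.Int.mod i every == 0 || transitions.contains i) with hkept
    have hmem : ∀ i ∈ kept, 0 ≤ i ∧ i < total := by
      intro i hi
      have := (List.mem_filter.mp hi).1
      exact (PySem.List.mem_pyRange_one).mp this
    have htq : ∀ i ∈ kept,
        (PySem.Set.ofList (transitions.filter
          (fun t => decide (0 ≤ t) && decide (t < total)))).contains i
        = transitions.contains i := by
      intro i hi; exact pvTset total transitions i (hmem i hi).1 (hmem i hi).2
    refine Prod.ext ?_ (Prod.ext ?_ ?_)
    · -- mapping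
      have := pvZipRange kept 0
      simp only [zero_add] at this
      simp [this, PySem.Dict.empty]
    · -- scenes
      simp only []
      rw [pvScFoldB (fun i => transitions.contains i) _ kept htq [] (-1)]
      simp [PySem.Dict.empty]
    · -- isTransitions
      have hemp : (PySem.Dict.empty : PySem.Dict Int Bool).items = [] := by
        simp [PySem.Dict.empty]
      rw [hemp, List.nil_append]
      exact (List.map_congr_left (fun i hi => by rw [htq i hi])).symm
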